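-- pv_equiv track=rewrite | github.com/Wellheor1/tasks_from_interviews | traveler/traveler.py | count_elevations
-- ===== SOURCE A (Python) =====
-- def count_elevations(path: str) -> int:
--     count = 0
--     start = 0
--     for i in path:
--         if i == "u":
--             start += 1
--         else:
--             start -= 1
--         if start == 0 and i == "d":
--             count += 1
--     return count
-- ===== SOURCE B (Python) =====
-- def count_elevations(path: str) -> int:
--     # Brute force: a 'd' step at index i ends at sea level iff the prefix
--     # path[:i+1] contains exactly as many 'u' steps as non-'u' steps,
--     # i.e. 2 * (#'u' in prefix) == i + 1.  No running altitude is kept.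
--     return sum(
--         1
--         for i, c in enumerate(path)
--         if c == "d" and 2 * sum(1 for x in path[: i + 1] if x == "u") == i + 1
--     )
-- ===== Notes on version B (the rewrite author's own statement) =====
-- stated objective: alternative
-- what changed: B keeps no running altitude: for each downward step it independently recounts the upward steps in its prefix and tests that they are exactly half of the prefix length, a stateless brute-force per-index check instead of A's single-pass accumulator.
import Mathlib
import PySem

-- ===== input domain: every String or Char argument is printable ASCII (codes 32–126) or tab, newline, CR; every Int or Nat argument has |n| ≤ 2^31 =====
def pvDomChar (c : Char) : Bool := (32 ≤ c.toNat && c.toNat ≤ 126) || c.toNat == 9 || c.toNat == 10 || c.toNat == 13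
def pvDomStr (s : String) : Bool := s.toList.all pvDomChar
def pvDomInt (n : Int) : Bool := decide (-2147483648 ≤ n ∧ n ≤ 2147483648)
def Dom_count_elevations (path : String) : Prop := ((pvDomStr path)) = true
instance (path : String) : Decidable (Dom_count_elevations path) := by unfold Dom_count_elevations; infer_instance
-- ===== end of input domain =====

-- B is a stateless brute force: each 'd' step independently recounts the 'u' steps of its prefix (alternative algorithm, quadratic instead of A's single-pass accumulator).


-- ===== PORT A =====
-- single loop: running altitude `start`, counter `count`
def count_elevations (path : String) : Int :=
  (path.toList.foldl
    (fun (st : Int × Int) i =>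
      let start := if i = 'u' then st.2 + 1 else st.2 - 1
      let count := if start = 0 ∧ i = 'd' then st.1 + 1 else st.1
      (count, start))
    (0, 0)).1

-- ===== PORT B =====
-- sum(1 for i, c in enumerate(path) if c == "d" and 2 * sum(1 for x in path[:i+1] if x == "u") == i + 1)
def count_elevations_alt (path : String) : Int :=
  (((PySem.List.enumerate path.toList 0).filter
    (fun p => decide (p.2 = 'd' ∧
      2 * (((PySem.List.slice path.toList (some 0) (some (p.1 + 1))).filter
              (fun x => decide (x = 'u'))).length : Int) = p.1 + 1))).length : Int)

-- ===== PRECONDITION & SPEC =====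
def Spec_count_elevations (path : String) (out : Int) : Prop := out = count_elevations_alt path
instance (path : String) (out : Int) : Decidable (Spec_count_elevations path out) := by unfold Spec_count_elevations; infer_instance

-- ===== CLAIM (what is proved, stated in full; the proofs are below) =====
def Claim_equal_count_elevations : Prop := ∀ (path : String), Dom_count_elevations path → Spec_count_elevations path (count_elevations path)

-- ===== LEMMAS AND PROOFS =====

-- A's loop body per element, tail-recursively on the altitude
def pvG : List Char → Int → Int
  | [], _ => 0
  | x :: xs, s =>
    let s' := if x = 'u' then s + 1 else s - 1
    (if s' = 0 ∧ x = 'd' then 1 else 0) + pvG xs s'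

-- number of 'u's, as an Int
def pvCU (l : List Char) : Int := ((l.filter (fun x => decide (x = 'u'))).length : Int)

-- B's expression on a raw char list
def pvB (l : List Char) : Int :=
  (((PySem.List.enumerate l 0).filter
    (fun p => decide (p.2 = 'd' ∧
      2 * (((PySem.List.slice l (some 0) (some (p.1 + 1))).filter
              (fun x => decide (x = 'u'))).length : Int) = p.1 + 1))).length : Int)

theorem pvA_loop (l : List Char) : ∀ (c s : Int),
    (l.foldl
      (fun (st : Int × Int) i =>
        let start := if i = 'u' then st.2 + 1 else st.2 - 1
        let count := if start = 0 ∧ i = 'd' then st.1 + 1 else st.1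
        (count, start))
      (c, s)).1 = c + pvG l s := by
  induction l with
  | nil => intro c s; simp [pvG]
  | cons x xs ih =>
    intro c s
    simp only [List.foldl_cons, pvG]
    rw [ih]
    split_ifs <;> ring

theorem pvG_append (l : List Char) (x : Char) : ∀ (s : Int),
    pvG (l ++ [x]) s
      = pvG l s
        + (if (s + (2 * pvCU l - l.length) + (if x = 'u' then 1 else -1) = 0 ∧ x = 'd')
            then 1 else 0) := by
  induction l with
  | nil =>
    intro s
    simp only [List.nil_append, pvG, pvCU, List.filter_nil, List.length_nil]
    by_cases hx : x = 'u' <;> simp [hx] <;> ring_nf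
  | cons y ys ih =>
    intro s
    simp only [List.cons_append, pvG]
    rw [ih]
    have hkey : (if y = 'u' then s + 1 else s - 1) + (2 * pvCU ys - ys.length)
        = s + (2 * pvCU (y :: ys) - (y :: ys).length) := by
      simp only [pvCU, List.filter_cons, List.length_cons]
      by_cases hy : y = 'u' <;> simp [hy] <;> push_cast <;> ring
    rw [hkey]
    ring

theorem pvB_append (l : List Char) (x : Char) :
    pvB (l ++ [x])
      = pvB l
        + (if (x = 'd' ∧ 2 * (pvCU l + (if x = 'u' then 1 else 0)) = (l.length : Int) + 1)
            then 1 else 0) := by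
  unfold pvB
  rw [PySem.List.enumerate_append, PySem.List.enumerate_cons, PySem.List.enumerate_nil,
    List.filter_append]
  -- on the old indices the slice of l ++ [x] agrees with the slice of l
  have hcongr : ∀ p ∈ PySem.List.enumerate l 0,
      (decide (p.2 = 'd' ∧
        2 * (((PySem.List.slice (l ++ [x]) (some 0) (some (p.1 + 1))).filter
                (fun x => decide (x = 'u'))).length : Int) = p.1 + 1))
      = (decide (p.2 = 'd' ∧
        2 * (((PySem.List.slice l (some 0) (some (p.1 + 1))).filter
                (fun x => decide (x = 'u'))).length : Int) = p.1 + 1)) := by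
    intro p hp
    rcases (PySem.List.mem_enumerate_iff l 0 p).1 hp with ⟨k, hk, rfl⟩
    have h1 : ((0 : Int) + k) + 1 = ((k + 1 : Nat) : Int) := by push_cast; ring
    rw [h1]
    simp only [PySem.List.slice_zero_start, PySem.List.slice_to_natCast]
    rw [List.take_append_of_le_length (by omega)]
  rw [List.filter_congr hcongr, List.filter_singleton]
  -- at the new last index the slice is the whole list
  have hwhole : PySem.List.slice (l ++ [x]) (some 0) (some (((0 : Int) + l.length) + 1))
      = l ++ [x] := by
    have h1 : ((0 : Int) + l.length) + 1 = ((l.length + 1 : Nat) : Int) := by push_cast; ring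
    rw [h1]
    simp only [PySem.List.slice_zero_start, PySem.List.slice_to_natCast]
    exact List.take_of_length_le (by simp)
  rw [hwhole]
  have hlen : (((l ++ [x]).filter (fun y => decide (y = 'u'))).length : Int)
      = pvCU l + (if x = 'u' then 1 else 0) := by
    simp only [List.filter_append, List.filter_singleton, pvCU]
    by_cases hx : x = 'u' <;> simp [hx]
  rw [hlen, List.length_append]
  simp only [zero_add]
  by_cases hC : (x = 'd' ∧ 2 * (pvCU l + (if x = 'u' then 1 else 0)) = (l.length : Int) + 1)
  · rw [if_pos hC, decide_eq_true hC]
    simp only [cond_true, List.length_cons, List.length_nil]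
    push_cast; ring
  · rw [if_neg hC, decide_eq_false hC]
    simp only [cond_false, List.length_nil, Nat.add_zero]
    ring

theorem pvG_eq_pvB (l : List Char) : pvG l 0 = pvB l := by
  induction l using List.reverseRecOn with
  | nil => simp [pvG, pvB, PySem.List.enumerate_nil]
  | append_singleton l x ih =>
    rw [pvG_append, pvB_append, ih]
    congr 1
    by_cases hd : x = 'd'
    · subst hd
      have hu : ¬ ('d' = 'u') := by decide
      simp only [if_neg hu, and_true, true_and]
      exact if_congr (Iff.intro (fun h => by omega) (fun h => by omega)) rfl rfl
    · rw [if_neg (by rintro ⟨-, h⟩; exact hd h), if_neg (by rintro ⟨h, -⟩; exact hd h)]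

-- ===== VERDICT (by name: the statement is the Claim_ definition above) =====
theorem count_elevations_spec : Claim_equal_count_elevations := by
  intro path _
  unfold Spec_count_elevations count_elevations count_elevations_alt
  rw [pvA_loop]
  rw [pvG_eq_pvB]
  simp [pvB]
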